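-- pv_equiv track=rewrite | github.com/robertnesterodhiambo/C_lag | CAS/byteland.py | solve_instance
-- ===== SOURCE A (Python) =====
-- MOD = 10**9 + 7
--
-- def solve_instance(n, m, d, cities, towers):
--     dp = [[0] * (n + 1) for _ in range(m + 1)]
--     dp[0][0] = 1  # Base case: 1 way to cover 0 cities with 0 towers
--
--     for j in range(1, m + 1):
--         for i in range(n - 1, -1, -1):
--             pos = next((idx for idx, city in enumerate(cities) if city > towers[j - 1] + d), n)
--             for k in range(i + 1, pos + 1):
--                 dp[j][k] = (dp[j][k] + dp[j - 1][i]) % MOD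
--
--     return [dp[i][n] for i in range(1, m + 1)]
-- ===== SOURCE B (Python) =====
-- MOD = 10**9 + 7
--
-- def solve_instance(n, m, d, cities, towers):
--     # dp over one row at a time: new_row[k] = prefix-sum of previous row for 1 <= k <= pos, else 0
--     if n == 0:
--         return [0] * m
--     prev = [1] + [0] * n
--     res = []
--     for j in range(m):
--         t = towers[j] + d
--         pos = next((i for i, c in enumerate(cities) if c > t), n)
--         pref = 0
--         cur = [0]
--         for k in range(1, n + 1):
--             pref = (pref + prev[k - 1]) % MOD
--             cur.append(pref if k <= pos else 0)
--         res.append(cur[n])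
--         prev = cur
--     return res
-- ===== Notes on version B (the rewrite author's own statement) =====
-- stated objective: faster
-- what changed: A fills an (m+1)x(n+1) dp table with a triple nested loop, rescanning cities for every (j,i) pair; B keeps a single rolling row and obtains each new row in one pass with a running prefix sum (computing the tower's cutoff index once per tower), dropping the whole inner i,k double loop.
-- outside the precondition, e.g. on solve_instance(2, 1, 0, [], []): A returns [1], B raises IndexError
import Mathlib
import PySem

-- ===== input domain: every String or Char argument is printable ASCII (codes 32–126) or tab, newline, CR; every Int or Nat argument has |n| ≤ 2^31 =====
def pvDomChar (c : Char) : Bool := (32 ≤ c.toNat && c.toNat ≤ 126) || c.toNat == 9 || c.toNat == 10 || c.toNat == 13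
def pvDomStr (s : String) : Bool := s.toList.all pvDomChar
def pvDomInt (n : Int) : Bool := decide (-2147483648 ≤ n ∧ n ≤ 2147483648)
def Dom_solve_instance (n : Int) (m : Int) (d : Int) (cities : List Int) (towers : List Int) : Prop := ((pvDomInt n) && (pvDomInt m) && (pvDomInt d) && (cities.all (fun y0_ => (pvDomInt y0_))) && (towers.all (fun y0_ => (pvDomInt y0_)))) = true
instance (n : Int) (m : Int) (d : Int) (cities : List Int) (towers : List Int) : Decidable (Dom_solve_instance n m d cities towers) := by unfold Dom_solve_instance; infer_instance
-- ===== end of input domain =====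

-- B replaces A's triple loop (and its per-i rescan of `cities`) by a rolling
-- row with a running prefix sum, O(m*(n+|cities|)) instead of O(m*n*(n+|cities|)).

-- ===== PORT A =====

-- shared helper: `next((idx for idx, city in enumerate(cities) if city > t), n)`
def posOf (n : Int) (cities : List Int) (t : Int) : Int :=
  match cities.findIdx? (fun c => decide (t < c)) with
  | some idx => (idx : Int)
  | none => n

-- dp[j][k]  (Python raises on out-of-range; total form used under Pre_)
def get2 (dp : List (List Int)) (j k : Int) : Int :=
  PySem.List.pyGetD (PySem.List.pyGetD dp j []) k 0

-- dp[j][k] = v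
def set2 (dp : List (List Int)) (j k : Int) (v : Int) : List (List Int) :=
  PySem.List.pySetD dp j (PySem.List.pySetD (PySem.List.pyGetD dp j []) k v)

def solve_instance (n : Int) (m : Int) (d : Int) (cities : List Int) (towers : List Int) : List Int :=
  -- dp = [[0] * (n + 1) for _ in range(m + 1)]; dp[0][0] = 1
  let dp0 : List (List Int) :=
    List.replicate (m + 1).toNat (List.replicate (n + 1).toNat (0 : Int))
  let dp1 := set2 dp0 0 0 1
  let dp2 := (PySem.List.pyRange 1 (m + 1) 1).foldl (fun dp j =>
      (PySem.List.pyRange (n - 1) (-1) (-1)).foldl (fun dp i =>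
        let pos := posOf n cities (PySem.List.pyGetD towers (j - 1) 0 + d)
        (PySem.List.pyRange (i + 1) (pos + 1) 1).foldl (fun dp k =>
          set2 dp j k ((get2 dp j k + get2 dp (j - 1) i) % 1000000007)) dp) dp) dp1
  (PySem.List.pyRange 1 (m + 1) 1).map (fun i => get2 dp2 i n)

-- ===== PORT B =====

def solve_instance_alt (n : Int) (m : Int) (d : Int) (cities : List Int) (towers : List Int) : List Int :=
  if n = 0 then List.replicate m.toNat 0
  else
    ((PySem.List.pyRange 0 m 1).foldl (fun (st : List Int × List Int) j =>
        let prev := st.1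
        let pos := posOf n cities (PySem.List.pyGetD towers j 0 + d)
        let pc := (PySem.List.pyRange 1 (n + 1) 1).foldl
          (fun (pc : Int × List Int) k =>
            let pref := (pc.1 + PySem.List.pyGetD prev (k - 1) 0) % 1000000007
            (pref, pc.2 ++ [if k ≤ pos then pref else 0])) ((0 : Int), [(0 : Int)])
        (pc.2, st.2 ++ [PySem.List.pyGetD pc.2 n 0]))
      ((1 : Int) :: List.replicate n.toNat 0, [])).2

-- ===== PRECONDITION & SPEC =====
-- Pre_ excludes exactly the inputs where Python A raises: negative n or m (the
-- base-case write dp[0][0] = 1 hits an empty table), and — when n ≥ 1 and m ≥ 1 —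
-- fewer than m towers (towers[j-1] raises) or some tower whose first uncoverable
-- city index exceeds n (the write dp[j][n+1] raises).  It also excludes inputs with
-- n ≥ 1, cities == [] and fewer than m towers, on which A happens to return (the
-- generator never evaluates towers[j-1] when cities is empty) but B's unconditional
-- towers[j] read raises.
def Pre_solve_instance (n : Int) (m : Int) (d : Int) (cities : List Int) (towers : List Int) : Prop :=
  0 ≤ n ∧ 0 ≤ m ∧ (n = 0 ∨ m = 0 ∨
    (m ≤ (towers.length : Int) ∧
     ∀ t ∈ towers.take m.toNat, posOf n cities (t + d) ≤ n))

instance (n : Int) (m : Int) (d : Int) (cities : List Int) (towers : List Int) : Decidable (Pre_solve_instance n m d cities towers) := by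
  unfold Pre_solve_instance; infer_instance

def pvWitness_solve_instance : Int × Int × Int × List Int × List Int := (2, 1, 0, [5], [1])

def Spec_solve_instance (n : Int) (m : Int) (d : Int) (cities : List Int) (towers : List Int) (out : List Int) : Prop := out = solve_instance_alt n m d cities towers
instance (n : Int) (m : Int) (d : Int) (cities : List Int) (towers : List Int) (out : List Int) : Decidable (Spec_solve_instance n m d cities towers out) := by unfold Spec_solve_instance; infer_instance

-- ===== CLAIM (what is proved, stated in full; the proofs are below) =====
def Claim_equal_solve_instance : Prop := ∀ (n : Int) (m : Int) (d : Int) (cities : List Int) (towers : List Int), Dom_solve_instance n m d cities towers → Pre_solve_instance n m d cities towers → Spec_solve_instance n m d cities towers (solve_instance n m d cities towers)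

-- ===== LEMMAS AND PROOFS =====

-- Basic arithmetic / list facts
theorem pvEmodAdd (a b : Int) : (a % 1000000007 + b) % 1000000007 = (a + b) % 1000000007 := by
  omega

theorem pvSumTakeSucc (l : List Int) (k : Nat) : (l.take (k+1)).sum = (l.take k).sum + l.getD k 0 := by
  rcases lt_or_ge k l.length with h | h
  · rw [List.sum_take_succ l k h, List.getD, List.getElem?_eq_getElem h]; rfl
  · simp [List.take_of_length_le h, List.take_of_length_le (le_trans h (Nat.le_succ _)), List.getD, List.getElem?_eq_none h]

theorem pvSumDropSucc (l : List Int) (i : Nat) : (l.drop i).sum = l.getD i 0 + (l.drop (i+1)).sum := by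
  rcases lt_or_ge i l.length with h | h
  · rw [List.drop_eq_getElem_cons h, List.sum_cons, List.getD, List.getElem?_eq_getElem h]; rfl
  · simp [List.drop_of_length_le h, List.drop_of_length_le (le_trans h (Nat.le_succ _)), List.getD, List.getElem?_eq_none h]

theorem pvPyGetD_toNat {α : Type} (xs : List α) (i : Int) (hi : 0 ≤ i) (dflt : α) :
    PySem.List.pyGetD xs i dflt = xs.getD i.toNat dflt := by
  obtain ⟨k, rfl⟩ := Int.eq_ofNat_of_zero_le hi
  simp [PySem.List.pyGetD_natCast]

-- === row specifications ===

-- entry of a finished dp row: prefix sum of the previous row, for 1 ≤ k ≤ pos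
def entryFn (prev : List Int) (pos : Int) (k : Nat) : Int :=
  if 1 ≤ (k : Int) ∧ (k : Int) ≤ pos then ((prev.take k).sum) % 1000000007 else 0

def rowFn (n : Int) (prev : List Int) (pos : Int) : List Int :=
  (List.range (n.toNat + 1)).map (entryFn prev pos)

def posAt (n : Int) (d : Int) (cities towers : List Int) (j : Nat) : Int :=
  posOf n cities (PySem.List.pyGetD towers (j : Int) 0 + d)

def rowsR (n : Int) (d : Int) (cities towers : List Int) : Nat → List Int
  | 0 => 1 :: List.replicate n.toNat 0
  | j + 1 => rowFn n (rowsR n d cities towers j) (posAt n d cities towers j)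

-- ============ B side ============

-- named copies of B's loop bodies (definitionally equal to the lambdas in the port)
def bInner (prev : List Int) (pos : Int) (pc : Int × List Int) (k : Int) : Int × List Int :=
  let pref := (pc.1 + PySem.List.pyGetD prev (k - 1) 0) % 1000000007
  (pref, pc.2 ++ [if k ≤ pos then pref else 0])

def bBody (n : Int) (d : Int) (cities towers : List Int) (st : List Int × List Int) (j : Int) : List Int × List Int :=
  let prev := st.1
  let pos := posOf n cities (PySem.List.pyGetD towers j 0 + d)
  let pc := (PySem.List.pyRange 1 (n + 1) 1).foldl (bInner prev pos) ((0 : Int), [(0 : Int)])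
  (pc.2, st.2 ++ [PySem.List.pyGetD pc.2 n 0])

theorem pvBAltEq (n m d : Int) (cities towers : List Int) :
    solve_instance_alt n m d cities towers
    = if n = 0 then List.replicate m.toNat 0
      else ((PySem.List.pyRange 0 m 1).foldl (bBody n d cities towers)
              ((1 : Int) :: List.replicate n.toNat 0, [])).2 := rfl


theorem pvBInner (n : Int) (prev : List Int) (pos : Int) :
    ∀ (len : Nat) (K : Int), 1 ≤ K → K + len = n + 1 →
    (PySem.List.pyRange K (n+1) 1).foldl (bInner prev pos)
      ((prev.take (K-1).toNat).sum % 1000000007, (List.range K.toNat).map (entryFn prev pos))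
    = ((prev.take n.toNat).sum % 1000000007, (List.range (n.toNat+1)).map (entryFn prev pos)) := by
  intro len
  induction len with
  | zero =>
    intro K hK hKn
    have h1 : K = n + 1 := by omega
    subst h1
    rw [PySem.List.pyRange_one_eq_nil (le_refl _)]
    have h2 : (n + 1 - 1).toNat = n.toNat := by omega
    have h3 : (n + 1).toNat = n.toNat + 1 := by omega
    rw [List.foldl_nil, h2, h3]
  | succ len ih =>
    intro K hK hKn
    rw [PySem.List.pyRange_one_cons (by omega), List.foldl_cons]
    have hgd : PySem.List.pyGetD prev (K - 1) 0 = prev.getD (K-1).toNat 0 :=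
      pvPyGetD_toNat prev (K-1) (by omega) 0
    have hpref : ((prev.take (K-1).toNat).sum % 1000000007 + PySem.List.pyGetD prev (K - 1) 0) % 1000000007
        = (prev.take K.toNat).sum % 1000000007 := by
      rw [hgd, pvEmodAdd, ← pvSumTakeSucc]
      have : (K-1).toNat + 1 = K.toNat := by omega
      rw [this]
    have hentry : (if K ≤ pos then (prev.take K.toNat).sum % 1000000007 else 0) = entryFn prev pos K.toNat := by
      unfold entryFn
      have hcast : ((K.toNat : Nat) : Int) = K := by omega
      rw [hcast]
      simp only [hK, true_and]
    have hsnd : (List.range K.toNat).map (entryFn prev pos) ++ [entryFn prev pos K.toNat]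
        = (List.range (K+1).toNat).map (entryFn prev pos) := by
      have : (K+1).toNat = K.toNat + 1 := by omega
      rw [this, List.range_succ, List.map_append, List.map_singleton]
    show (PySem.List.pyRange (K+1) (n+1) 1).foldl (bInner prev pos)
        (((prev.take (K-1).toNat).sum % 1000000007 + PySem.List.pyGetD prev (K - 1) 0) % 1000000007,
         (List.range K.toNat).map (entryFn prev pos) ++
           [if K ≤ pos then ((prev.take (K-1).toNat).sum % 1000000007 + PySem.List.pyGetD prev (K - 1) 0) % 1000000007 else 0]) = _
    rw [hpref, hentry, hsnd]
    have harg : (prev.take K.toNat).sum = (prev.take (K + 1 - 1).toNat).sum := by norm_num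
    rw [harg]
    exact ih (K+1) (by omega) (by omega)

-- the inner row-building fold of B, from its real initial state
theorem pvBInner' (n : Int) (hn : 1 ≤ n) (prev : List Int) (pos : Int) :
    (PySem.List.pyRange 1 (n+1) 1).foldl (bInner prev pos) ((0 : Int), [(0 : Int)])
    = ((prev.take n.toNat).sum % 1000000007, rowFn n prev pos) := by
  have h0 : ((0 : Int), [(0 : Int)]) =
      (((prev.take ((1:Int)-1).toNat).sum % 1000000007, (List.range (1:Int).toNat).map (entryFn prev pos)) : Int × List Int) := by
    norm_num [entryFn]
  rw [h0]
  exact pvBInner n prev pos n.toNat 1 le_rfl (by omega)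

theorem pvBOuter (n m d : Int) (cities towers : List Int) (hn : 1 ≤ n) :
    ∀ (len : Nat) (J : Int) (acc : List Int), 0 ≤ J → J + len = m →
    ((PySem.List.pyRange J m 1).foldl (bBody n d cities towers)
      (rowsR n d cities towers J.toNat, acc)).2
    = acc ++ (List.range len).map
        (fun t => PySem.List.pyGetD (rowsR n d cities towers (J.toNat + t + 1)) n 0) := by
  intro len
  induction len with
  | zero =>
    intro J acc hJ hJm
    rw [PySem.List.pyRange_one_eq_nil (show m ≤ J by omega), List.foldl_nil]
    simp
  | succ len ih =>
    intro J acc hJ hJm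
    rw [PySem.List.pyRange_one_cons (show J < m by omega), List.foldl_cons]
    have hbody : bBody n d cities towers (rowsR n d cities towers J.toNat, acc) J
        = (rowsR n d cities towers (J.toNat + 1),
           acc ++ [PySem.List.pyGetD (rowsR n d cities towers (J.toNat + 1)) n 0]) := by
      unfold bBody
      have hposJ : posOf n cities (PySem.List.pyGetD towers J 0 + d)
          = posAt n d cities towers J.toNat := by
        unfold posAt
        have : ((J.toNat : Nat) : Int) = J := by omega
        rw [this]
      simp only [hposJ, pvBInner' n hn (rowsR n d cities towers J.toNat) (posAt n d cities towers J.toNat)]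
      rfl
    rw [hbody]
    have hJ1 : (J+1).toNat = J.toNat + 1 := by omega
    have := ih (J+1) (acc ++ [PySem.List.pyGetD (rowsR n d cities towers (J.toNat + 1)) n 0])
      (by omega) (by omega)
    rw [hJ1] at this
    rw [this, List.append_assoc]
    have harith : ∀ t : Nat, J.toNat + 1 + t + 1 = J.toNat + (t + 1) + 1 := by
      intro t; omega
    simp only [List.range_succ_eq_map, List.map_cons, List.map_map, Function.comp_def,
      Nat.add_zero, List.singleton_append, harith]

theorem pvBMain (n m d : Int) (cities towers : List Int) (hn : 1 ≤ n) (hm : 0 ≤ m) :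
    solve_instance_alt n m d cities towers
    = (List.range m.toNat).map (fun t => PySem.List.pyGetD (rowsR n d cities towers (t + 1)) n 0) := by
  rw [pvBAltEq, if_neg (by omega)]
  have h0 : ((1 : Int) :: List.replicate n.toNat 0) = rowsR n d cities towers (0 : Int).toNat := rfl
  rw [h0, pvBOuter n m d cities towers hn m.toNat 0 [] le_rfl (by omega)]
  simp

-- ============ A side ============

-- named copies of A's loop bodies (definitionally equal to the lambdas in the port)
def aIBody (n : Int) (d : Int) (cities towers : List Int) (j : Int) (dp : List (List Int)) (i : Int) : List (List Int) :=
  let pos := posOf n cities (PySem.List.pyGetD towers (j - 1) 0 + d)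
  (PySem.List.pyRange (i + 1) (pos + 1) 1).foldl
    (fun dp k => set2 dp j k ((get2 dp j k + get2 dp (j - 1) i) % 1000000007)) dp

def aBody (n : Int) (d : Int) (cities towers : List Int) (dp : List (List Int)) (j : Int) : List (List Int) :=
  (PySem.List.pyRange (n - 1) (-1) (-1)).foldl (aIBody n d cities towers j) dp

theorem pvAEq (n m d : Int) (cities towers : List Int) :
    solve_instance n m d cities towers
    = (PySem.List.pyRange 1 (m + 1) 1).map (fun i =>
        get2 ((PySem.List.pyRange 1 (m + 1) 1).foldl (aBody n d cities towers)
          (set2 (List.replicate (m + 1).toNat (List.replicate (n + 1).toNat (0 : Int))) 0 0 1)) i n) := rfl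

-- row-level step of the innermost loop, adding x into slot k
def rKStep (x : Int) (r : List Int) (k : Int) : List Int :=
  PySem.List.pySetD r k ((PySem.List.pyGetD r k 0 + x) % 1000000007)

-- partially built row: contributions of prev[i0..] are already in
def entryFrom (prev : List Int) (pos : Int) (i0 : Int) (k : Nat) : Int :=
  if i0 < (k : Int) ∧ (k : Int) ≤ pos then (((prev.take k).drop i0.toNat).sum) % 1000000007 else 0

def rowPartial (n : Int) (prev : List Int) (pos i0 : Int) : List Int :=
  (List.range (n.toNat + 1)).map (entryFrom prev pos i0)

-- mixed row: slots < K already updated for i, slots ≥ K still at i+1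
def rowQ (n : Int) (prev : List Int) (pos i K : Int) : List Int :=
  (List.range (n.toNat + 1)).map (fun (k : Nat) =>
    if (k : Int) < K then entryFrom prev pos i k else entryFrom prev pos (i + 1) k)

theorem pvGetDMapRange (f : Nat → Int) (L t : Nat) (h : t < L) (dflt : Int) :
    ((List.range L).map f).getD t dflt = f t := by
  simp [List.getD, h]

theorem pvRowQHi (n : Int) (prev : List Int) (pos i K : Int) (h : pos < K) :
    rowQ n prev pos i K = rowPartial n prev pos i := by
  unfold rowQ rowPartial
  apply List.map_congr_left
  intro k _
  by_cases hk : (k : Int) < K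
  · simp [hk]
  · rw [if_neg hk]
    unfold entryFrom
    rw [if_neg (by omega), if_neg (by omega)]

theorem pvRowQLo (n : Int) (prev : List Int) (pos i : Int) :
    rowQ n prev pos i (i + 1) = rowPartial n prev pos (i + 1) := by
  unfold rowQ rowPartial
  apply List.map_congr_left
  intro k _
  by_cases hk : (k : Int) < i + 1
  · rw [if_pos hk]
    unfold entryFrom
    rw [if_neg (by omega), if_neg (by omega)]
  · rw [if_neg hk]

theorem pvKFold (prev : List Int) (pos n i : Int) (hi : 0 ≤ i) (hpn : pos ≤ n) :
    ∀ (fuel : Nat) (K : Int), i + 1 ≤ K → (pos + 1 - K).toNat = fuel →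
    (PySem.List.pyRange K (pos + 1) 1).foldl (rKStep (PySem.List.pyGetD prev i 0))
      (rowQ n prev pos i K)
    = rowPartial n prev pos i := by
  intro fuel
  induction fuel with
  | zero =>
    intro K hK hf
    rw [PySem.List.pyRange_one_eq_nil (show pos + 1 ≤ K by omega), List.foldl_nil]
    exact pvRowQHi n prev pos i K (by omega)
  | succ fuel ih =>
    intro K hK hf
    have hKpos : K ≤ pos := by omega
    have hn1 : 1 ≤ n := by omega
    have hKn : K.toNat < n.toNat + 1 := by omega
    have hcast : ((K.toNat : Nat) : Int) = K := by omega
    rw [PySem.List.pyRange_one_cons (show K < pos + 1 by omega), List.foldl_cons]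
    have hstep : rKStep (PySem.List.pyGetD prev i 0) (rowQ n prev pos i K) K
        = rowQ n prev pos i (K + 1) := by
      unfold rKStep
      -- the value read at slot K is the not-yet-updated entry
      have hget : PySem.List.pyGetD (rowQ n prev pos i K) K 0 = entryFrom prev pos (i + 1) K.toNat := by
        rw [pvPyGetD_toNat _ K (by omega) 0]
        unfold rowQ
        rw [pvGetDMapRange _ _ _ hKn]
        rw [hcast, if_neg (by omega)]
      rw [hget]
      -- the written value is the updated entry
      have hval : (entryFrom prev pos (i + 1) K.toNat + PySem.List.pyGetD prev i 0) % 1000000007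
          = entryFrom prev pos i K.toNat := by
        have hx : PySem.List.pyGetD prev i 0 = prev.getD i.toNat 0 := pvPyGetD_toNat prev i hi 0
        have hS : ((prev.take K.toNat).drop i.toNat).sum
            = prev.getD i.toNat 0 + ((prev.take K.toNat).drop (i.toNat + 1)).sum := by
          rw [pvSumDropSucc (prev.take K.toNat) i.toNat]
          congr 1
          rw [List.getD, List.getD, List.getElem?_take_of_lt (by omega)]
        have hE1 : entryFrom prev pos (i + 1) K.toNat
            = ((prev.take K.toNat).drop (i.toNat + 1)).sum % 1000000007 := by
          unfold entryFrom
          by_cases hiK : i + 1 < K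
          · rw [if_pos (by constructor <;> omega)]
            have : (i + 1).toNat = i.toNat + 1 := by omega
            rw [this]
          · have hKi : K = i + 1 := by omega
            have hdrop : (prev.take K.toNat).drop (i.toNat + 1) = [] := by
              apply List.drop_of_length_le
              have := List.length_take_le K.toNat prev
              omega
            rw [if_neg (by omega), hdrop]
            simp
        have hE0 : entryFrom prev pos i K.toNat
            = ((prev.take K.toNat).drop i.toNat).sum % 1000000007 := by
          unfold entryFrom
          rw [if_pos (by constructor <;> omega)]
        rw [hE1, hE0, hx, pvEmodAdd, hS]
        ring_nf
      rw [hval]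
      -- writing slot K advances the mixed row
      rw [← hcast, PySem.List.pySetD_natCast]
      unfold rowQ
      apply List.ext_getElem
      · simp
      · intro t h1 h2
        rw [List.getElem_set]
        simp only [List.getElem_map, List.getElem_range]
        have h2' : t < n.toNat + 1 := by simpa using h2
        by_cases ht : K.toNat = t
        · subst ht
          rw [if_pos rfl, if_pos (by omega)]
          congr 1
        · rw [if_neg ht]
          by_cases htK : (t : Int) < (K.toNat : Int)
          · rw [if_pos htK, if_pos (by omega)]
          · rw [if_neg htK, if_neg (by omega)]
    rw [hstep]
    exact ih (K + 1) (by omega) (by omega)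

theorem pvIFold (prev : List Int) (pos n : Int) (hpn : pos ≤ n) :
    ∀ (fuel : Nat) (i0 : Int), -1 ≤ i0 → i0 ≤ n - 1 → (i0 + 1).toNat = fuel →
    (PySem.List.pyRange i0 (-1) (-1)).foldl
      (fun r i => (PySem.List.pyRange (i + 1) (pos + 1) 1).foldl (rKStep (PySem.List.pyGetD prev i 0)) r)
      (rowPartial n prev pos (i0 + 1))
    = rowPartial n prev pos 0 := by
  intro fuel
  induction fuel with
  | zero =>
    intro i0 h1 h2 hf
    have : i0 = -1 := by omega
    subst this
    rw [PySem.List.pyRange_neg_one_eq_nil (by omega), List.foldl_nil]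
    norm_num
  | succ fuel ih =>
    intro i0 h1 h2 hf
    have hi0 : 0 ≤ i0 := by omega
    rw [PySem.List.pyRange_neg_one_cons (show -1 < i0 by omega), List.foldl_cons]
    have hfirst : (PySem.List.pyRange (i0 + 1) (pos + 1) 1).foldl
        (rKStep (PySem.List.pyGetD prev i0 0)) (rowPartial n prev pos (i0 + 1))
        = rowPartial n prev pos i0 := by
      rw [← pvRowQLo n prev pos i0]
      exact pvKFold prev pos n i0 hi0 hpn (pos + 1 - (i0 + 1)).toNat (i0 + 1) le_rfl rfl
    rw [hfirst]
    have := ih (i0 - 1) (by omega) (by omega) (by omega)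
    have harg : i0 - 1 + 1 = i0 := by omega
    rw [harg] at this
    exact this

-- getD on set lists
theorem pvGetDSetSelf (dp : List (List Int)) (jn : Nat) (r : List Int) (h : jn < dp.length) :
    (dp.set jn r).getD jn [] = r := by
  rw [List.getD, List.getElem?_set_self (by omega)]
  rfl

theorem pvGetDSetNe (dp : List (List Int)) (jn tn : Nat) (r : List Int) (h : tn ≠ jn) :
    (dp.set jn r).getD tn [] = dp.getD tn [] := by
  rw [List.getD, List.getElem?_set_ne (by omega), List.getD]

-- the inner k-loop of A, lifted from the table to row j
theorem pvTKFold (j i : Int) (hj : 1 ≤ j) :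
    ∀ (lk : List Int) (dp : List (List Int)), j.toNat < dp.length →
    lk.foldl (fun dp k => set2 dp j k ((get2 dp j k + get2 dp (j - 1) i) % 1000000007)) dp
    = PySem.List.pySetD dp j (lk.foldl (rKStep (get2 dp (j - 1) i)) (PySem.List.pyGetD dp j [])) := by
  intro lk
  induction lk with
  | nil =>
    intro dp hlen
    simp only [List.foldl_nil]
    rw [PySem.List.pySetD_of_nonneg _ _ (show (0:Int) ≤ j by omega), pvPyGetD_toNat _ _ (by omega)]
    have hg : dp.getD j.toNat [] = dp[j.toNat] := by
      rw [List.getD, List.getElem?_eq_getElem hlen]; rfl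
    rw [hg, List.set_getElem_self]
  | cons k lk ih =>
    intro dp hlen
    simp only [List.foldl_cons]
    have hr : PySem.List.pyGetD dp j [] = dp.getD j.toNat [] := pvPyGetD_toNat _ _ (by omega) _
    have hstep : set2 dp j k ((get2 dp j k + get2 dp (j - 1) i) % 1000000007)
        = dp.set j.toNat (rKStep (get2 dp (j - 1) i) (PySem.List.pyGetD dp j []) k) := by
      unfold set2 rKStep get2
      rw [PySem.List.pySetD_of_nonneg _ _ (show (0:Int) ≤ j by omega)]
    rw [hstep]
    have hlen' : j.toNat < (dp.set j.toNat (rKStep (get2 dp (j - 1) i) (PySem.List.pyGetD dp j []) k)).length := by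
      simpa using hlen
    rw [ih _ hlen']
    have hne : (j - 1).toNat ≠ j.toNat := by omega
    have hprev : get2 (dp.set j.toNat (rKStep (get2 dp (j - 1) i) (PySem.List.pyGetD dp j []) k)) (j - 1) i
        = get2 dp (j - 1) i := by
      unfold get2
      rw [pvPyGetD_toNat _ (j-1) (by omega), pvPyGetD_toNat dp (j-1) (by omega),
        pvGetDSetNe _ _ _ _ hne]
    rw [hprev]
    have hself : PySem.List.pyGetD (dp.set j.toNat (rKStep (get2 dp (j - 1) i) (PySem.List.pyGetD dp j []) k)) j []
        = rKStep (get2 dp (j - 1) i) (PySem.List.pyGetD dp j []) k := by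
      rw [pvPyGetD_toNat _ _ (by omega), pvGetDSetSelf _ _ _ hlen]
    rw [hself]
    rw [PySem.List.pySetD_of_nonneg _ _ (show (0:Int) ≤ j by omega),
        PySem.List.pySetD_of_nonneg _ _ (show (0:Int) ≤ j by omega), List.set_set]

-- the middle i-loop of A, lifted from the table to row j
theorem pvTIFold (n d : Int) (cities towers : List Int) (j : Int) (prow : List Int) (hj : 1 ≤ j) :
    ∀ (li : List Int) (dp : List (List Int)), j.toNat < dp.length →
    PySem.List.pyGetD dp (j - 1) [] = prow →
    li.foldl (aIBody n d cities towers j) dp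
    = PySem.List.pySetD dp j (li.foldl
        (fun r i => (PySem.List.pyRange (i + 1) (posOf n cities (PySem.List.pyGetD towers (j - 1) 0 + d) + 1) 1).foldl
          (rKStep (PySem.List.pyGetD prow i 0)) r)
        (PySem.List.pyGetD dp j [])) := by
  intro li
  induction li with
  | nil =>
    intro dp hlen hprev
    simp only [List.foldl_nil]
    rw [PySem.List.pySetD_of_nonneg _ _ (show (0:Int) ≤ j by omega), pvPyGetD_toNat _ _ (by omega)]
    have hg : dp.getD j.toNat [] = dp[j.toNat] := by
      rw [List.getD, List.getElem?_eq_getElem hlen]; rfl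
    rw [hg, List.set_getElem_self]
  | cons i li ih =>
    intro dp hlen hprev
    simp only [List.foldl_cons]
    have hx : get2 dp (j - 1) i = PySem.List.pyGetD prow i 0 := by
      unfold get2
      rw [hprev]
    have hfirst : aIBody n d cities towers j dp i
        = PySem.List.pySetD dp j
            ((PySem.List.pyRange (i + 1) (posOf n cities (PySem.List.pyGetD towers (j - 1) 0 + d) + 1) 1).foldl
              (rKStep (PySem.List.pyGetD prow i 0)) (PySem.List.pyGetD dp j [])) := by
      unfold aIBody
      rw [pvTKFold j i hj _ dp hlen, hx]
    rw [hfirst]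
    rw [PySem.List.pySetD_of_nonneg _ _ (show (0:Int) ≤ j by omega)]
    set r1 := (PySem.List.pyRange (i + 1) (posOf n cities (PySem.List.pyGetD towers (j - 1) 0 + d) + 1) 1).foldl
              (rKStep (PySem.List.pyGetD prow i 0)) (PySem.List.pyGetD dp j []) with hr1
    have hlen' : j.toNat < (dp.set j.toNat r1).length := by simpa using hlen
    have hprev' : PySem.List.pyGetD (dp.set j.toNat r1) (j - 1) [] = prow := by
      rw [pvPyGetD_toNat _ _ (by omega), pvGetDSetNe _ _ _ _ (by omega)]
      rw [pvPyGetD_toNat _ _ (by omega)] at hprev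
      exact hprev
    rw [ih _ hlen' hprev']
    have hself : PySem.List.pyGetD (dp.set j.toNat r1) j [] = r1 := by
      rw [pvPyGetD_toNat _ _ (by omega), pvGetDSetSelf _ _ _ hlen]
    rw [hself]
    rw [PySem.List.pySetD_of_nonneg _ _ (show (0:Int) ≤ j by omega), List.set_set,
      PySem.List.pySetD_of_nonneg _ _ (show (0:Int) ≤ j by omega)]

-- ============ dp-table invariant ============

def zrowL (n : Int) : List Int := List.replicate (n.toNat + 1) 0

def InvT (n : Int) (m : Int) (d : Int) (cities towers : List Int) (J : Int) (dp : List (List Int)) : Prop :=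
  dp.length = m.toNat + 1 ∧ ∀ t : Nat, t ≤ m.toNat →
    dp.getD t [] = if (t : Int) ≤ J then rowsR n d cities towers t else zrowL n

theorem pvZrowPartial (n : Int) (prev : List Int) (pos : Int) (hpn : pos ≤ n) :
    zrowL n = rowPartial n prev pos n := by
  unfold zrowL rowPartial
  apply List.ext_getElem (by simp)
  intro t h1 h2
  simp only [List.getElem_map, List.getElem_range, List.getElem_replicate]
  unfold entryFrom
  rw [if_neg (by omega)]

theorem pvRowPartialZero (n : Int) (prev : List Int) (pos : Int) :
    rowPartial n prev pos 0 = rowFn n prev pos := by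
  unfold rowPartial rowFn
  apply List.map_congr_left
  intro k _
  unfold entryFrom entryFn
  simp only [Int.toNat_zero, List.drop_zero]
  have hiff : (0 < (k : Int) ∧ (k : Int) ≤ pos) ↔ (1 ≤ (k : Int) ∧ (k : Int) ≤ pos) := by omega
  simp only [hiff]

theorem pvStep (n m d : Int) (cities towers : List Int) (hn0 : 0 ≤ n)
    (j : Int) (hj1 : 1 ≤ j) (hjm : j ≤ m)
    (hpos : posAt n d cities towers (j - 1).toNat ≤ n)
    (dp : List (List Int)) (hInv : InvT n m d cities towers (j - 1) dp) :
    InvT n m d cities towers j (aBody n d cities towers dp j) := by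
  obtain ⟨hlen, hrows⟩ := hInv
  have hjlen : j.toNat < dp.length := by omega
  have hPeq : posOf n cities (PySem.List.pyGetD towers (j - 1) 0 + d)
      = posAt n d cities towers (j - 1).toNat := by
    unfold posAt
    have hc : (((j - 1).toNat : Nat) : Int) = j - 1 := by omega
    rw [hc]
  have hPn : posOf n cities (PySem.List.pyGetD towers (j - 1) 0 + d) ≤ n := by
    rw [hPeq]; exact hpos
  have hprev : PySem.List.pyGetD dp (j - 1) [] = rowsR n d cities towers (j - 1).toNat := by
    rw [pvPyGetD_toNat _ _ (by omega), hrows (j - 1).toNat (by omega), if_pos (by omega)]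
  have hcur : PySem.List.pyGetD dp j [] = zrowL n := by
    rw [pvPyGetD_toNat _ _ (by omega), hrows j.toNat (by omega), if_neg (by omega)]
  unfold aBody
  rw [pvTIFold n d cities towers j (rowsR n d cities towers (j - 1).toNat) hj1 _ dp hjlen hprev,
    hcur]
  have hrow : (PySem.List.pyRange (n - 1) (-1) (-1)).foldl
      (fun r i => (PySem.List.pyRange (i + 1) (posOf n cities (PySem.List.pyGetD towers (j - 1) 0 + d) + 1) 1).foldl
        (rKStep (PySem.List.pyGetD (rowsR n d cities towers (j - 1).toNat) i 0)) r) (zrowL n)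
      = rowsR n d cities towers j.toNat := by
    rw [pvZrowPartial n (rowsR n d cities towers (j - 1).toNat) _ hPn]
    have hif := pvIFold (rowsR n d cities towers (j - 1).toNat)
      (posOf n cities (PySem.List.pyGetD towers (j - 1) 0 + d)) n hPn
      n.toNat (n - 1) (by omega) (by omega) (by omega)
    rw [show n - 1 + 1 = n from by ring] at hif
    rw [hif, pvRowPartialZero, hPeq]
    have hj' : j.toNat = (j - 1).toNat + 1 := by omega
    rw [hj']
    rfl
  rw [hrow, PySem.List.pySetD_of_nonneg _ _ (show (0:Int) ≤ j by omega)]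
  constructor
  · simpa using hlen
  · intro t ht
    by_cases hteq : t = j.toNat
    · subst hteq
      rw [pvGetDSetSelf _ _ _ hjlen, if_pos (by omega)]
    · rw [pvGetDSetNe _ _ _ _ hteq, hrows t ht]
      by_cases h1 : (t : Int) ≤ j - 1
      · rw [if_pos h1, if_pos (by omega)]
      · rw [if_neg h1, if_neg (by omega)]

theorem pvOuter (n m d : Int) (cities towers : List Int) (hn0 : 0 ≤ n)
    (hpos : ∀ t : Nat, t < m.toNat → posAt n d cities towers t ≤ n) :
    ∀ (fuel : Nat) (J : Int), 0 ≤ J → J ≤ m → (m - J).toNat = fuel →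
    ∀ dp, InvT n m d cities towers J dp →
    InvT n m d cities towers m
      ((PySem.List.pyRange (J + 1) (m + 1) 1).foldl (aBody n d cities towers) dp) := by
  intro fuel
  induction fuel with
  | zero =>
    intro J h0 h1 hf dp hInv
    rw [PySem.List.pyRange_one_eq_nil (show m + 1 ≤ J + 1 by omega), List.foldl_nil]
    have : J = m := by omega
    rwa [this] at hInv
  | succ fuel ih =>
    intro J h0 h1 hf dp hInv
    rw [PySem.List.pyRange_one_cons (show J + 1 < m + 1 by omega), List.foldl_cons]
    have hstep := pvStep n m d cities towers hn0 (J + 1) (by omega) (by omega)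
      (by
        have hc : (J + 1 - 1).toNat = J.toNat := by omega
        rw [hc]
        exact hpos J.toNat (by omega))
      dp (by
        have hc : J + 1 - 1 = J := by ring
        rwa [hc])
    exact ih (J + 1) (by omega) (by omega) (by omega) _ hstep

theorem pvInit (n m d : Int) (cities towers : List Int) (hn0 : 0 ≤ n) (hm : 0 ≤ m) :
    InvT n m d cities towers 0
      (set2 (List.replicate (m + 1).toNat (List.replicate (n + 1).toNat (0 : Int))) 0 0 1) := by
  have hm1 : (m + 1).toNat = m.toNat + 1 := by omega
  have hn1 : (n + 1).toNat = n.toNat + 1 := by omega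
  unfold set2
  rw [PySem.List.pySetD_of_nonneg _ _ le_rfl, PySem.List.pySetD_of_nonneg _ _ le_rfl,
    pvPyGetD_toNat _ _ le_rfl]
  simp only [Int.toNat_zero]
  have hz : (List.replicate (m + 1).toNat (List.replicate (n + 1).toNat (0 : Int))).getD 0 []
      = List.replicate (n + 1).toNat (0 : Int) := by
    rw [List.getD, List.getElem?_replicate, if_pos (by omega)]
    rfl
  rw [hz]
  have hrow0 : (List.replicate (n + 1).toNat (0 : Int)).set 0 1 = rowsR n d cities towers 0 := by
    rw [hn1, List.replicate_succ]
    rfl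
  rw [hrow0]
  constructor
  · simp [hm1]
  · intro t ht
    by_cases h0 : t = 0
    · subst h0
      rw [pvGetDSetSelf _ _ _ (by simp [hm1]), if_pos (by omega)]
    · rw [pvGetDSetNe _ _ _ _ (by omega), if_neg (by omega)]
      rw [List.getD, List.getElem?_replicate, if_pos (by omega)]
      unfold zrowL
      rw [hn1]
      rfl

theorem pvAMain (n m d : Int) (cities towers : List Int) (hn : 1 ≤ n) (hm : 0 ≤ m)
    (hpos : ∀ t : Nat, t < m.toNat → posAt n d cities towers t ≤ n) :
    solve_instance n m d cities towers
    = (List.range m.toNat).map (fun t => PySem.List.pyGetD (rowsR n d cities towers (t + 1)) n 0) := by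
  rw [pvAEq]
  have hInv := pvOuter n m d cities towers (by omega) hpos (m - 0).toNat 0 le_rfl hm rfl _
    (pvInit n m d cities towers (by omega) hm)
  rw [show (0:Int) + 1 = 1 from by ring] at hInv
  obtain ⟨hlen, hrows⟩ := hInv
  apply List.ext_getElem
  · rw [List.length_map, List.length_map, PySem.List.length_pyRange_one, List.length_range]
    omega
  · intro t h1 h2
    rw [List.getElem_map, List.getElem_map, List.getElem_range,
      PySem.List.getElem_pyRange_one 1 (m + 1) t (by simpa using h1)]
    unfold get2
    have hg : PySem.List.pyGetD ((PySem.List.pyRange 1 (m + 1) 1).foldl (aBody n d cities towers)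
        (set2 (List.replicate (m + 1).toNat (List.replicate (n + 1).toNat (0 : Int))) 0 0 1)) (1 + (t : Int)) []
        = rowsR n d cities towers (t + 1) := by
      have ht' : t < m.toNat := by
        have := h2
        rw [List.length_map, List.length_range] at this
        exact this
      rw [pvPyGetD_toNat _ _ (by omega)]
      have hc : (1 + (t : Int)).toNat = t + 1 := by omega
      rw [hc, hrows (t + 1) (by omega), if_pos (by omega)]
    rw [hg]

theorem pvAZero (m d : Int) (cities towers : List Int) (hm : 0 ≤ m) :
    solve_instance 0 m d cities towers = List.replicate m.toNat 0 := by
  rw [pvAEq]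
  have hbody : ∀ (dp : List (List Int)) (j : Int), j ∈ PySem.List.pyRange 1 (m + 1) 1 →
      aBody 0 d cities towers dp j = dp := by
    intro dp j _
    unfold aBody
    rw [show (0:Int) - 1 = -1 from by ring, PySem.List.pyRange_neg_one_eq_nil le_rfl, List.foldl_nil]
  rw [PySem.List.foldl_congr_mem (PySem.List.pyRange 1 (m + 1) 1) (aBody 0 d cities towers)
    (fun acc _ => acc) _ hbody, PySem.List.foldl_ignore]
  apply List.ext_getElem
  · rw [List.length_map, PySem.List.length_pyRange_one, List.length_replicate]
    omega
  · intro t h1 h2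
    rw [List.getElem_map, List.getElem_replicate,
      PySem.List.getElem_pyRange_one 1 (m + 1) t (by simpa using h1)]
    have ht' : t < m.toNat := by
      have := h1
      rw [List.length_map, PySem.List.length_pyRange_one] at this
      omega
    unfold get2 set2
    rw [PySem.List.pySetD_of_nonneg _ _ le_rfl]
    simp only [Int.toNat_zero]
    rw [pvPyGetD_toNat _ (1 + (t : Int)) (by omega)]
    rw [show ((1:Int) + (t:Int)).toNat = t + 1 from by omega]
    rw [pvGetDSetNe _ _ _ _ (by omega)]
    rw [List.getD, List.getElem?_replicate, if_pos (by omega)]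
    rfl

-- ===== VERDICT (by name: the statement is the Claim_ definition above) =====
theorem solve_instance_spec : Claim_equal_solve_instance := by
  unfold Claim_equal_solve_instance
  intro n m d cities towers _ hpre
  unfold Spec_solve_instance
  obtain ⟨hn0, hm0, hcase⟩ := hpre
  by_cases hn : n = 0
  · subst hn
    rw [pvAZero m d cities towers hm0, pvBAltEq, if_pos rfl]
  · have hn1 : 1 ≤ n := by omega
    have hpos : ∀ t : Nat, t < m.toNat → posAt n d cities towers t ≤ n := by
      intro t ht
      rcases hcase with h | h | ⟨hlen, hall⟩
      · exact absurd h hn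
      · omega
      · have htl : t < towers.length := by omega
        have hmem : towers[t] ∈ towers.take m.toNat := by
          have hlt : t < (towers.take m.toNat).length := by
            rw [List.length_take]; omega
          have hget : (towers.take m.toNat)[t] = towers[t] := List.getElem_take
          rw [← hget]
          exact List.getElem_mem hlt
        have hp := hall towers[t] hmem
        unfold posAt
        have hgd : PySem.List.pyGetD towers (t : Int) 0 = towers[t] := by
          rw [PySem.List.pyGetD_natCast, List.getD, List.getElem?_eq_getElem htl]
          rfl
        rw [hgd]
        exact hp
    rw [pvAMain n m d cities towers hn1 hm0 hpos, pvBMain n m d cities towers hn1 hm0]
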